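-- pv_equiv track=rewrite | github.com/stubz151/Advent-Of-code | 2023/day10/day10.py | get_branch_count
-- ===== SOURCE A (Python) =====
-- def get_branch_count(arr):
--     count = 0
--     if len(arr) == 0:
--         return 1
--     val = arr[0]
--     if len(arr) > 1 and arr[1] == val + 1:
--         count += get_branch_count(arr[1:])
--         if len(arr) > 2 and arr[2] == val + 2:
--             count += get_branch_count(arr[2:]) + 1
--             if len(arr) > 3 and arr[3] == val + 3:
--                 count += get_branch_count(arr[3:]) + 1
--     if len(arr) > 1 and arr[1] == val + 2:
--         count += 0 + get_branch_count(arr[1:])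
--         if len(arr) > 2 and arr[2] == val + 3:
--             count += get_branch_count(arr[2:]) + 1
--     if len(arr) > 1 and arr[1] == val + 3:
--         count += get_branch_count(arr[1:])
--     return count
-- ===== SOURCE B (Python) =====
-- def get_branch_count(arr):
--     # DP over suffixes, right to left: g1,g2,g3 are the counts for the
--     # suffixes starting 1,2,3 positions after the current one; nxt keeps
--     # the next up-to-3 values, so no suffix count is ever recomputed.
--     g1 = g2 = g3 = 1
--     nxt = []
--     for v in reversed(arr):
--         c = 0
--         if len(nxt) >= 1 and nxt[0] == v + 1:
--             c += g1
--             if len(nxt) >= 2 and nxt[1] == v + 2: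
--                 c += g2 + 1
--                 if len(nxt) >= 3 and nxt[2] == v + 3:
--                     c += g3 + 1
--         if len(nxt) >= 1 and nxt[0] == v + 2:
--             c += g1
--             if len(nxt) >= 2 and nxt[1] == v + 3:
--                 c += g2 + 1
--         if len(nxt) >= 1 and nxt[0] == v + 3:
--             c += g1
--         g1, g2, g3 = c, g1, g2
--         nxt = [v] + nxt[:2]
--     return g1
-- ===== Notes on version B (the rewrite author's own statement) =====
-- stated objective: alternative
-- what changed: replaces A's recursion over suffix slices by a single right-to-left pass that tabulates the counts of the three most recent suffixes (DP over suffix start), so no suffix is ever recomputed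
import Mathlib
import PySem

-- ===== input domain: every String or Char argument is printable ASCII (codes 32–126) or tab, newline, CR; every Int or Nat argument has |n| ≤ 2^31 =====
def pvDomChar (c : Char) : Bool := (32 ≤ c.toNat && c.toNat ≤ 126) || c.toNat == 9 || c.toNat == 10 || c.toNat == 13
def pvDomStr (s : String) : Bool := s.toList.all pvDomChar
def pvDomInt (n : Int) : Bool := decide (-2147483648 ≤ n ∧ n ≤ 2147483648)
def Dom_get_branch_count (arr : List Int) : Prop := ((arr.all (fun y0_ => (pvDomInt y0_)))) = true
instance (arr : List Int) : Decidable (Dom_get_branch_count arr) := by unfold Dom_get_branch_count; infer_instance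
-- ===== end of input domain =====

-- B replaces A's recursion over suffix slices by a single right-to-left pass
-- carrying the three most recent suffix counts (objective: alternative).

-- ===== PORT A =====
-- literal port of A: recursion on the slices arr[1:], arr[2:], arr[3:]
def get_branch_count (arr : List Int) : Int :=
  if arr.length = 0 then 1
  else
    let val := arr.getD 0 0
    let count : Int := 0
    let count :=
      if h1 : arr.length > 1 ∧ arr.getD 1 0 = val + 1 then
        let count := count + get_branch_count (PySem.List.slice arr (some 1) none)
        if h2 : arr.length > 2 ∧ arr.getD 2 0 = val + 2 then
          let count := count + get_branch_count (PySem.List.slice arr (some 2) none) + 1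
          if h3 : arr.length > 3 ∧ arr.getD 3 0 = val + 3 then
            count + get_branch_count (PySem.List.slice arr (some 3) none) + 1
          else count
        else count
      else count
    let count :=
      if h4 : arr.length > 1 ∧ arr.getD 1 0 = val + 2 then
        let count := count + 0 + get_branch_count (PySem.List.slice arr (some 1) none)
        if h5 : arr.length > 2 ∧ arr.getD 2 0 = val + 3 then
          count + get_branch_count (PySem.List.slice arr (some 2) none) + 1
        else count
      else count
    let count :=
      if _h6 : arr.length > 1 ∧ arr.getD 1 0 = val + 3 then
        count + get_branch_count (PySem.List.slice arr (some 1) none)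
      else count
    count
termination_by arr.length
decreasing_by
  all_goals first
    | (rw [PySem.List.slice_from arr (a := 1) (by norm_num)]; simp only [List.length_drop]; omega)
    | (rw [PySem.List.slice_from arr (a := 2) (by norm_num)]; simp only [List.length_drop]; omega)
    | (rw [PySem.List.slice_from arr (a := 3) (by norm_num)]; simp only [List.length_drop]; omega)

-- ===== PORT B =====
-- one step of B's loop: state is (g1, g2, g3, nxt)
def pvAltStep (v : Int) (s : Int × Int × Int × List Int) : Int × Int × Int × List Int :=
  let (g1, g2, g3, nxt) := s
  let c : Int :=
    (if nxt.length ≥ 1 ∧ nxt.getD 0 0 = v + 1 then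
       g1 + (if nxt.length ≥ 2 ∧ nxt.getD 1 0 = v + 2 then
               g2 + 1 + (if nxt.length ≥ 3 ∧ nxt.getD 2 0 = v + 3 then g3 + 1 else 0)
             else 0)
     else 0)
    + (if nxt.length ≥ 1 ∧ nxt.getD 0 0 = v + 2 then
         g1 + (if nxt.length ≥ 2 ∧ nxt.getD 1 0 = v + 3 then g2 + 1 else 0)
       else 0)
    + (if nxt.length ≥ 1 ∧ nxt.getD 0 0 = v + 3 then g1 else 0)
  (c, g1, g2, v :: nxt.take 2)

def get_branch_count_alt (arr : List Int) : Int :=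
  (arr.foldr pvAltStep (1, 1, 1, [])).1

-- ===== PRECONDITION & SPEC =====
def Spec_get_branch_count (arr : List Int) (out : Int) : Prop := out = get_branch_count_alt arr
instance (arr : List Int) (out : Int) : Decidable (Spec_get_branch_count arr out) := by unfold Spec_get_branch_count; infer_instance

-- ===== CLAIM (what is proved, stated in full; the proofs are below) =====
def Claim_equal_get_branch_count : Prop := ∀ (arr : List Int), Dom_get_branch_count arr → Spec_get_branch_count arr (get_branch_count arr)

-- ===== LEMMAS AND PROOFS =====

lemma pv_take3_getD (t : List Int) :
    ((t.take 3)[0]?.getD 0 = t[0]?.getD 0) ∧ ((t.take 3)[1]?.getD 0 = t[1]?.getD 0) ∧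
      ((t.take 3)[2]?.getD 0 = t[2]?.getD 0) := by
  rcases t with _ | ⟨a, _ | ⟨b, _ | ⟨c, t⟩⟩⟩ <;> simp

set_option maxHeartbeats 2000000 in
-- loop invariant: after folding over a suffix l, the state holds the counts
-- of l, l.drop 1, l.drop 2 and the first three values of l
lemma pv_fold_inv (l : List Int) :
    l.foldr pvAltStep (1, 1, 1, []) =
      (get_branch_count l, get_branch_count (l.drop 1), get_branch_count (l.drop 2), l.take 3) := by
  induction l with
  | nil => simp [get_branch_count]
  | cons v t ih =>
    rw [List.foldr_cons, ih]
    have e1 : PySem.List.slice (v :: t) (some 1) none = t := by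
      rw [PySem.List.slice_from _ (a := 1) (by norm_num)]; simp
    have e2 : PySem.List.slice (v :: t) (some 2) none = t.drop 1 := by
      rw [PySem.List.slice_from _ (a := 2) (by norm_num)]; simp
    have e3 : PySem.List.slice (v :: t) (some 3) none = t.drop 2 := by
      rw [PySem.List.slice_from _ (a := 3) (by norm_num)]; simp
    obtain ⟨g0, g1, g2⟩ := pv_take3_getD t
    have c1 : min 3 t.length ≥ 1 ↔ t.length + 1 > 1 := by omega
    have c2 : min 3 t.length ≥ 2 ↔ t.length + 1 > 2 := by omega
    have c3 : min 3 t.length ≥ 3 ↔ t.length + 1 > 3 := by omega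
    have hne : ¬(t.length + 1 = 0) := by omega
    rw [get_branch_count.eq_def (v :: t)]
    simp only [pvAltStep, e1, e2, e3, List.length_cons, List.drop_succ_cons,
      List.drop_zero, List.take_succ_cons, List.take_take, List.length_take,
      Prod.mk.injEq, List.getD, List.getElem?_cons_zero, List.getElem?_cons_succ,
      g0, g1, g2, c1, c2, c3, hne, if_false, Option.getD_some]
    refine ⟨?_, trivial, trivial, by norm_num⟩
    split_ifs <;> ring

-- ===== VERDICT (by name: the statement is the Claim_ definition above) =====
theorem get_branch_count_spec : Claim_equal_get_branch_count := by
  intro arr _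
  unfold Spec_get_branch_count get_branch_count_alt
  rw [pv_fold_inv]
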